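-- pv_equiv track=rewrite | github.com/Disha-Bhatti/CICD2 | page_segmentation.py | get_relative_coordinates
-- ===== SOURCE A (Python) =====
-- def get_relative_coordinates(peaks_list, origin_coordinates, axis):
--     x, y, w, h = origin_coordinates
--     new_coordinates = []
--
--     for im in range(len(peaks_list)):
--         if im == 0:
--             if axis == 0:
--                 new_coordinates.append([x, y, peaks_list[im], h])
--             else:
--                 new_coordinates.append([x, y, w, peaks_list[im]])
--         else:
--             if axis == 0:
--                 new_coordinates.append(
--                     [x + peaks_list[im - 1], y, peaks_list[im] - peaks_list[im - 1], h]
--                 )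
--             else:
--                 new_coordinates.append(
--                     [x, y + peaks_list[im - 1], w, peaks_list[im] - peaks_list[im - 1]]
--                 )
--
--         if im == (len(peaks_list) - 1):
--             if axis == 0:
--                 new_coordinates.append([x + peaks_list[im], y, w - peaks_list[im], h])
--             else:
--                 new_coordinates.append([x, y + peaks_list[im], w, h - peaks_list[im]])
--     return new_coordinates
-- ===== SOURCE B (Python) =====
-- def get_relative_coordinates(peaks_list, origin_coordinates, axis):
--     x, y, w, h = origin_coordinates
--     if not peaks_list:
--         return []
--     size = w if axis == 0 else h
--     bounds = [0] + list(peaks_list) + [size]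
--     if axis == 0:
--         return [[x + p, y, c - p, h] for p, c in zip(bounds, bounds[1:])]
--     return [[x, y + p, w, c - p] for p, c in zip(bounds, bounds[1:])]
-- ===== Notes on version B (the rewrite author's own statement) =====
-- stated objective: simpler
-- what changed: Replaces A's indexed loop with first/middle/last branching by a single uniform map over consecutive pairs of a precomputed boundary list [0]+peaks+[size].
import Mathlib
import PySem

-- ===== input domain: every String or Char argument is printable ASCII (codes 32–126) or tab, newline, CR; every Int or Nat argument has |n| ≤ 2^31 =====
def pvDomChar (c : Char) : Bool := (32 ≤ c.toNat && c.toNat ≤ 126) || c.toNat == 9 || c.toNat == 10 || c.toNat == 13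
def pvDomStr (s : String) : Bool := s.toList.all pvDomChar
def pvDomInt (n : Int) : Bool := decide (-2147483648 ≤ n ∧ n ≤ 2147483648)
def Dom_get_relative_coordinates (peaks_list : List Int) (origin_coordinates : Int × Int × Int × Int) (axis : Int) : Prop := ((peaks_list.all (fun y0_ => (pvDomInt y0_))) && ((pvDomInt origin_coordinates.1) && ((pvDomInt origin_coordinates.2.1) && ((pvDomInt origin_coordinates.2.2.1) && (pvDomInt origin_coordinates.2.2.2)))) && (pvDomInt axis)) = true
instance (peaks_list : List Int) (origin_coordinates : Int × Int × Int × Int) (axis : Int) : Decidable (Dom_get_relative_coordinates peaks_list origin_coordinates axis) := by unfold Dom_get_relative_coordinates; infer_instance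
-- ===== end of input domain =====

-- B replaces A's per-index loop with first/middle/last branches by one uniform map over consecutive boundary pairs (objective: simpler).


-- ===== PORT A =====
def get_relative_coordinates (peaks_list : List Int) (origin_coordinates : Int × Int × Int × Int) (axis : Int) : List (List Int) :=
  let x := origin_coordinates.1
  let y := origin_coordinates.2.1
  let w := origin_coordinates.2.2.1
  let h := origin_coordinates.2.2.2
  -- for im in range(len(peaks_list)): … (indices are always in range, so pyGetD's default is never used)
  (PySem.List.pyRange 0 (peaks_list.length : Int) 1).foldl (fun acc im =>
    let acc :=
      if im == 0 then
        if axis == 0 then acc ++ [[x, y, PySem.List.pyGetD peaks_list im 0, h]]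
        else acc ++ [[x, y, w, PySem.List.pyGetD peaks_list im 0]]
      else
        if axis == 0 then
          acc ++ [[x + PySem.List.pyGetD peaks_list (im - 1) 0, y,
                   PySem.List.pyGetD peaks_list im 0 - PySem.List.pyGetD peaks_list (im - 1) 0, h]]
        else
          acc ++ [[x, y + PySem.List.pyGetD peaks_list (im - 1) 0, w,
                   PySem.List.pyGetD peaks_list im 0 - PySem.List.pyGetD peaks_list (im - 1) 0]]
    if im == ((peaks_list.length : Int) - 1) then
      if axis == 0 then acc ++ [[x + PySem.List.pyGetD peaks_list im 0, y, w - PySem.List.pyGetD peaks_list im 0, h]]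
      else acc ++ [[x, y + PySem.List.pyGetD peaks_list im 0, w, h - PySem.List.pyGetD peaks_list im 0]]
    else acc) []

-- ===== PORT B =====
def get_relative_coordinates_alt (peaks_list : List Int) (origin_coordinates : Int × Int × Int × Int) (axis : Int) : List (List Int) :=
  let x := origin_coordinates.1
  let y := origin_coordinates.2.1
  let w := origin_coordinates.2.2.1
  let h := origin_coordinates.2.2.2
  if peaks_list.isEmpty then []
  else
    let size := if axis == 0 then w else h
    let bounds : List Int := 0 :: (peaks_list ++ [size])
    if axis == 0 then (bounds.zip bounds.tail).map (fun pc => [x + pc.1, y, pc.2 - pc.1, h])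
    else (bounds.zip bounds.tail).map (fun pc => [x, y + pc.1, w, pc.2 - pc.1])

-- ===== PRECONDITION & SPEC =====
def Spec_get_relative_coordinates (peaks_list : List Int) (origin_coordinates : Int × Int × Int × Int) (axis : Int) (out : List (List Int)) : Prop := out = get_relative_coordinates_alt peaks_list origin_coordinates axis
instance (peaks_list : List Int) (origin_coordinates : Int × Int × Int × Int) (axis : Int) (out : List (List Int)) : Decidable (Spec_get_relative_coordinates peaks_list origin_coordinates axis out) := by unfold Spec_get_relative_coordinates; infer_instance

-- ===== CLAIM (what is proved, stated in full; the proofs are below) =====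
def Claim_equal_get_relative_coordinates : Prop := ∀ (peaks_list : List Int) (origin_coordinates : Int × Int × Int × Int) (axis : Int), Dom_get_relative_coordinates peaks_list origin_coordinates axis → Spec_get_relative_coordinates peaks_list origin_coordinates axis (get_relative_coordinates peaks_list origin_coordinates axis)

-- ===== LEMMAS AND PROOFS =====

-- A's fold, for a generic box-builder 'box prev cur' and trailing boundary 'size',
-- equals B's map over consecutive pairs of the boundary list 0 :: l ++ [size].
theorem pv_fold_eq_zip (box : Int → Int → List Int) (size : Int) (l : List Int) (hl : l ≠ []) :
    (PySem.List.pyRange 0 (l.length : Int) 1).foldl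
      (fun acc im =>
        let acc2 := if im == (0:Int) then acc ++ [box 0 (PySem.List.pyGetD l im 0)]
                    else acc ++ [box (PySem.List.pyGetD l (im-1) 0) (PySem.List.pyGetD l im 0)]
        if im == ((l.length:Int) - 1) then acc2 ++ [box (PySem.List.pyGetD l im 0) size] else acc2) []
    = ((0 :: (l ++ [size])).zip (l ++ [size])).map (fun pc => box pc.1 pc.2) := by
  obtain ⟨m, hm⟩ : ∃ m, l.length = m + 1 := by
    cases l with
    | nil => exact absurd rfl hl
    | cons a t => exact ⟨t.length, rfl⟩
  rw [hm, PySem.List.pyRange_zero_natCast, List.foldl_map]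
  rw [List.range_succ, List.foldl_append]
  have hmid : (List.range m).foldl
      (fun acc (k : Nat) =>
        let acc2 := if ((k:Int)) == (0:Int) then acc ++ [box 0 (PySem.List.pyGetD l ((k:Int)) 0)]
                    else acc ++ [box (PySem.List.pyGetD l (((k:Int))-1) 0) (PySem.List.pyGetD l ((k:Int)) 0)]
        if ((k:Int)) == (((m+1:Nat):Int) - 1) then acc2 ++ [box (PySem.List.pyGetD l ((k:Int)) 0) size] else acc2) []
      = (List.range m).map (fun k =>
          if k = 0 then box 0 (l.getD k 0) else box (l.getD (k-1) 0) (l.getD k 0)) := by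
    rw [PySem.List.foldl_congr_mem _ _
        (fun acc (k : Nat) => acc ++ [if k = 0 then box 0 (l.getD k 0) else box (l.getD (k-1) 0) (l.getD k 0)]) _ ?_]
    · exact PySem.List.foldl_append_singleton_eq_map _ _ _
    · intro acc k hk
      rw [List.mem_range] at hk
      have hne : (((k:Int)) == (((m+1:Nat):Int) - 1)) = false := by
        simp only [beq_eq_false_iff_ne]; push_cast; omega
      simp only [hne, Bool.false_eq_true, if_false]
      by_cases h0 : k = 0
      · subst h0
        rw [PySem.List.pyGetD_natCast]
        simp
      · have hz : (((k:Int)) == (0:Int)) = false := by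
          simp only [beq_eq_false_iff_ne]; exact_mod_cast h0
        have hc : ((k:Int)) - 1 = ((k-1 : Nat) : Int) := by omega
        rw [hc, PySem.List.pyGetD_natCast, PySem.List.pyGetD_natCast]
        simp [hz, h0]
  rw [hmid]
  simp only [List.foldl_cons, List.foldl_nil]
  have hlast : (((m:Int)) == (((m+1:Nat):Int) - 1)) = true := by
    simp only [beq_iff_eq]; omega
  simp only [hlast, if_true]
  have hml : m < l.length := by omega
  have hstep : (if ((m:Int)) == (0:Int) then
        (List.range m).map (fun k =>
          if k = 0 then box 0 (l.getD k 0) else box (l.getD (k-1) 0) (l.getD k 0)) ++ [box 0 (PySem.List.pyGetD l ((m:Int)) 0)]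
      else
        (List.range m).map (fun k =>
          if k = 0 then box 0 (l.getD k 0) else box (l.getD (k-1) 0) (l.getD k 0)) ++ [box (PySem.List.pyGetD l (((m:Int))-1) 0) (PySem.List.pyGetD l ((m:Int)) 0)])
      = (List.range (m+1)).map (fun k =>
          if k = 0 then box 0 (l.getD k 0) else box (l.getD (k-1) 0) (l.getD k 0)) := by
    rw [List.range_succ, List.map_append, List.map_singleton]
    by_cases h0 : m = 0
    · subst h0
      rw [PySem.List.pyGetD_natCast]
      simp
    · have hz : (((m:Int)) == (0:Int)) = false := by
        simp only [beq_eq_false_iff_ne]; exact_mod_cast h0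
      have hc : ((m:Int)) - 1 = ((m-1 : Nat) : Int) := by omega
      rw [hc, PySem.List.pyGetD_natCast, PySem.List.pyGetD_natCast]
      simp [hz, h0]
  rw [hstep, PySem.List.pyGetD_natCast]
  apply List.ext_getElem
  · simp [List.length_zip, hm]
  · intro i hi1 hi2
    have hi : i < m + 2 := by
      have := hi1; simp at this; omega
    rw [List.getElem_map, List.getElem_zip]
    by_cases hlt : i < m + 1
    · rw [List.getElem_append_left (by simpa using hlt), List.getElem_map, List.getElem_range]
      have hil : i < l.length := by omega
      by_cases h0 : i = 0
      · subst h0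
        rw [if_pos rfl, List.getD_eq_getElem _ _ hil, List.getElem_cons_zero,
          List.getElem_append_left hil]
      · obtain ⟨j, rfl⟩ : ∃ j, i = j + 1 := ⟨i - 1, by omega⟩
        have hjl : j < l.length := by omega
        rw [if_neg h0, List.getD_eq_getElem _ _ (show j + 1 - 1 < l.length by omega),
          List.getD_eq_getElem _ _ hil, List.getElem_cons_succ,
          List.getElem_append_left hjl, List.getElem_append_left hil]
        simp
    · have him : i = m + 1 := by omega
      subst him
      have hL : ((List.range (m+1)).map (fun k =>
            if k = 0 then box 0 (l.getD k 0) else box (l.getD (k-1) 0) (l.getD k 0))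
            ++ [box (l.getD m 0) size])[m+1]'hi1 = box (l.getD m 0) size := by
        rw [List.getElem_append_right (by simp)]
        simp
      rw [hL, List.getElem_cons_succ, List.getD_eq_getElem _ _ hml,
        List.getElem_append_left hml]
      have h3 : (l ++ [size])[m+1]'(by simp [hm]) = size := by
        rw [List.getElem_append_right (by omega)]
        simp
      simp only [h3]

-- ===== VERDICT (by name: the statement is the Claim_ definition above) =====
theorem get_relative_coordinates_spec : Claim_equal_get_relative_coordinates := by
  intro peaks_list origin_coordinates axis _hdom
  unfold Spec_get_relative_coordinates
  obtain ⟨x, y, w, h⟩ := origin_coordinates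
  by_cases hnil : peaks_list = []
  · subst hnil; rfl
  · have hne : peaks_list.isEmpty = false := by
      simp [hnil]
    by_cases hax : (axis == (0:Int)) = true
    · rw [show get_relative_coordinates_alt peaks_list (x, y, w, h) axis
          = ((0 :: (peaks_list ++ [w])).zip (peaks_list ++ [w])).map
              (fun pc => [x + pc.1, y, pc.2 - pc.1, h]) from by
        simp only [get_relative_coordinates_alt, hne, hax, if_true]
        rfl]
      rw [← pv_fold_eq_zip (fun p c => [x + p, y, c - p, h]) w peaks_list hnil]
      simp only [get_relative_coordinates]
      apply PySem.List.foldl_congr_mem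
      intro acc im _him
      simp only [hax, if_true]
      by_cases h0 : (im == (0:Int)) = true <;>
        simp [h0]
    · rw [show get_relative_coordinates_alt peaks_list (x, y, w, h) axis
          = ((0 :: (peaks_list ++ [h])).zip (peaks_list ++ [h])).map
              (fun pc => [x, y + pc.1, w, pc.2 - pc.1]) from by
        simp only [get_relative_coordinates_alt, hne, hax, if_false, Bool.false_eq_true]
        simp]
      rw [← pv_fold_eq_zip (fun p c => [x, y + p, w, c - p]) h peaks_list hnil]
      simp only [get_relative_coordinates]
      apply PySem.List.foldl_congr_mem
      intro acc im _him
      simp only [hax, if_false, Bool.false_eq_true]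
      by_cases h0 : (im == (0:Int)) = true <;>
        simp [h0]
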